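-- pv_equiv track=rewrite | github.com/keyin-sd-12/spr2-g2-robot | Eugene.py | fill_distances
-- ===== SOURCE A (Python) =====
-- def fill_distances(total_distance, divisor=490):
--     list_result = []
--     while total_distance >= divisor:
--         list_result.append(divisor)
--         total_distance = total_distance - divisor
--     if total_distance >= 0:
--         list_result.append(total_distance)
--     return list_result
-- ===== SOURCE B (Python) =====
-- def fill_distances(total_distance, divisor=490):
--     if total_distance < 0:
--         return []
--     q, rem = divmod(total_distance, divisor)
--     return [divisor] * int(q) + [rem]
-- ===== Notes on version B (the rewrite author's own statement) =====
-- stated objective: simpler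
-- what changed: Replaces the repeated-subtraction while-loop with a single divmod closed form: the result is [divisor]*q plus the remainder.
import Mathlib
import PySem

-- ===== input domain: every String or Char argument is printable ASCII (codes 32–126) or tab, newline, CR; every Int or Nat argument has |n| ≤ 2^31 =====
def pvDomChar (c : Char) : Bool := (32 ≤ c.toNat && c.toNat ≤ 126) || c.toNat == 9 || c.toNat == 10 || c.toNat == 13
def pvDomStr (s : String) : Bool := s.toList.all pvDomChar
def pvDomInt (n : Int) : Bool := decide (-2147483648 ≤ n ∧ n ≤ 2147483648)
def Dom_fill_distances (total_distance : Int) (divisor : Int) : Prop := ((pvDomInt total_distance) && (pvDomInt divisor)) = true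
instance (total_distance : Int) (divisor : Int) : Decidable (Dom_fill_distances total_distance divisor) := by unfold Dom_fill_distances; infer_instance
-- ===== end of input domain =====

-- B replaces A's repeated-subtraction loop with a single divmod closed form ([divisor]*q ++ [rem]); Pre_ excludes only the inputs where A's loop never terminates.


-- ===== PORT A =====
-- A's while-loop: append divisor and subtract while total_distance ≥ divisor; then
-- append the remainder if it is ≥ 0.  The extra `0 < divisor` conjunct in the guard
-- only makes the recursion total in Lean: Python diverges exactly when
-- divisor ≤ total_distance ∧ divisor ≤ 0, and Pre_fill_distances excludes those inputs.
def fillLoopA (total_distance : Int) (divisor : Int) (acc : List Int) : List Int :=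
  if _h : divisor ≤ total_distance ∧ 0 < divisor then
    fillLoopA (total_distance - divisor) divisor (acc ++ [divisor])
  else
    if 0 ≤ total_distance then acc ++ [total_distance] else acc
termination_by total_distance.toNat
decreasing_by omega

def fill_distances (total_distance : Int) (divisor : Int) : List Int :=
  fillLoopA total_distance divisor []

-- ===== PORT B =====
def fill_distances_alt (total_distance : Int) (divisor : Int) : List Int :=
  if total_distance < 0 then []
  else
    let q := PySem.Int.floordiv total_distance divisor
    let rem := PySem.Int.mod total_distance divisor
    List.replicate q.toNat divisor ++ [rem]

-- ===== PRECONDITION & SPEC =====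
-- Pre_ excludes exactly the inputs on which A's while-loop never terminates
-- (divisor ≤ 0 together with total_distance ≥ divisor); on every other input A returns.
def Pre_fill_distances (total_distance : Int) (divisor : Int) : Prop :=
  0 < divisor ∨ total_distance < divisor
instance (total_distance : Int) (divisor : Int) : Decidable (Pre_fill_distances total_distance divisor) := by unfold Pre_fill_distances; infer_instance

def pvWitness_fill_distances : Int × Int := (1200, 490)

def Spec_fill_distances (total_distance : Int) (divisor : Int) (out : List Int) : Prop := out = fill_distances_alt total_distance divisor
instance (total_distance : Int) (divisor : Int) (out : List Int) : Decidable (Spec_fill_distances total_distance divisor out) := by unfold Spec_fill_distances; infer_instance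

-- ===== CLAIM (what is proved, stated in full; the proofs are below) =====
def Claim_equal_fill_distances : Prop := ∀ (total_distance : Int) (divisor : Int), Dom_fill_distances total_distance divisor → Pre_fill_distances total_distance divisor → Spec_fill_distances total_distance divisor (fill_distances total_distance divisor)

-- ===== LEMMAS AND PROOFS =====

-- Loop invariant: with a positive divisor and nonnegative start, the loop emits
-- t / divisor copies of divisor followed by t % divisor, after the accumulator.
lemma fillLoopA_closed (divisor : Int) (hd : 0 < divisor) :
    ∀ (t : Int) (acc : List Int), 0 ≤ t →
      fillLoopA t divisor acc =
        acc ++ (List.replicate (t / divisor).toNat divisor ++ [t % divisor]) := by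
  intro t acc
  induction t, acc using fillLoopA.induct divisor with
  | case1 t acc h ih =>
    intro _
    rw [fillLoopA, dif_pos h]
    rw [ih (by omega)]
    have hq : (t - divisor) / divisor = t / divisor - 1 := by
      have := Int.add_mul_ediv_right t (-1) (by omega : divisor ≠ 0)
      have e : t + -1 * divisor = t - divisor := by ring
      rw [e] at this
      omega
    have hm : (t - divisor) % divisor = t % divisor := Int.sub_emod_right t divisor
    have hq1 : 1 ≤ t / divisor := by
      rw [Int.le_ediv_iff_mul_le hd]; omega
    have hnat : (t / divisor).toNat = ((t - divisor) / divisor).toNat + 1 := by omega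
    rw [hm, hnat, List.replicate_succ]
    simp
  | case2 t acc h ht' =>
    intro ht
    rw [fillLoopA, dif_neg h, if_pos ht]
    have hlt : t < divisor := by omega
    rw [Int.ediv_eq_zero_of_lt ht hlt, Int.emod_eq_of_lt ht hlt]
    simp
  | case3 t acc h ht' => intro ht; omega

-- ===== VERDICT (by name: the statement is the Claim_ definition above) =====
theorem fill_distances_spec : Claim_equal_fill_distances := by
  intro t d _ hpre
  unfold Spec_fill_distances fill_distances fill_distances_alt
  by_cases hneg : t < 0
  · rw [if_pos hneg, fillLoopA]
    have hng : ¬ (d ≤ t ∧ 0 < d) := by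
      rcases hpre with h | h <;> omega
    rw [dif_neg hng, if_neg (by omega)]
  · have hd : 0 < d := by rcases hpre with h | h <;> omega
    rw [if_neg hneg,
        PySem.Int.floordiv_eq_ediv_of_pos hd, PySem.Int.mod_eq_emod_of_pos hd,
        fillLoopA_closed d hd t [] (by omega)]
    simp
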